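-- pv_equiv track=rewrite | github.com/service0427/packet_coupang_v1 | lib/api/cp_signature.py | _process_with_nge_key
-- ===== SOURCE A (Python) =====
-- def _process_with_nge_key(data: str) -> str:
--     """nextGreaterElements 변환 - "01234" 키로 5회 circular_right_shift (반대 방향)
--
--     "01234"에서 각 문자 - '0' = 0~4
--     """
--     result = data.encode('utf-8') if isinstance(data, str) else data
--     key = "01234"  # 0x1637의 상수
--     for ch in key:
--         shift = ord(ch) - ord('0')
--         # nextGreaterElements는 왼쪽 시프트 (음수 right shift)
--         if len(result) > 0 and shift > 0:
--             shift_eff = shift % len(result)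
--             result = result[shift_eff:] + result[:shift_eff]
--     return result.decode('utf-8', errors='replace') if isinstance(result, bytes) else result
-- ===== SOURCE B (Python) =====
-- def _process_with_nge_key(data: str) -> str:
--     """Single rotation: the five shifts 0..4 compose to one left rotation by 10 mod len."""
--     result = data.encode('utf-8') if isinstance(data, str) else data
--     n = len(result)
--     if n > 0:
--         s = 10 % n
--         result = result[s:] + result[:s]
--     return result.decode('utf-8', errors='replace') if isinstance(result, bytes) else result
-- ===== Notes on version B (the rewrite author's own statement) =====
-- stated objective: simpler
-- what changed: The five sequential circular shifts (by 0,1,2,3,4, each mod len) are replaced by a single rotation by 10 % len, eliminating the loop over the key.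
import Mathlib
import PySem

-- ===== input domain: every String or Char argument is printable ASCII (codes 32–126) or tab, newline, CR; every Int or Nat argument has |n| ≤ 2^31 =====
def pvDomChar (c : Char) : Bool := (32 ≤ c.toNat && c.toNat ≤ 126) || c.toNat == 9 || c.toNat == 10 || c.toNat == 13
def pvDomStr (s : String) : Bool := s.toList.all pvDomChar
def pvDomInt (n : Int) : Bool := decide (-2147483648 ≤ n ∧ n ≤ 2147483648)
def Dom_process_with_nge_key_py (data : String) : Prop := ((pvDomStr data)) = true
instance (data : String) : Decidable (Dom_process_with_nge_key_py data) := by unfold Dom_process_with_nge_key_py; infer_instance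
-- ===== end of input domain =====

-- B replaces A's five-iteration shift loop by one rotation by 10 mod len (the shifts 0..4 compose); simpler, no loop.
-- Both ports model utf-8 encode / decode(errors='replace') as toList / ofList, exact on the ASCII domain Dom_.

-- ===== PORT A =====
-- loop body of `for ch in key:` in A
def stepA (result : List Char) (ch : Char) : List Char :=
  let shift : Int := (ch.toNat : Int) - ('0'.toNat : Int)
  if 0 < result.length ∧ 0 < shift then
    let se := PySem.Int.mod shift (result.length : Int)
    PySem.List.slice result (some se) none ++ PySem.List.slice result none (some se)
  else result

def process_with_nge_key_py (data : String) : String :=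
  String.ofList (("01234".toList).foldl stepA data.toList)

-- ===== PORT B =====
def process_with_nge_key_py_alt (data : String) : String :=
  let result := data.toList
  let n := result.length
  if 0 < n then
    let s := PySem.Int.mod 10 (n : Int)
    String.ofList (PySem.List.slice result (some s) none ++ PySem.List.slice result none (some s))
  else String.ofList result

-- ===== PRECONDITION & SPEC =====
def Spec_process_with_nge_key_py (data : String) (out : String) : Prop := out = process_with_nge_key_py_alt data
instance (data : String) (out : String) : Decidable (Spec_process_with_nge_key_py data out) := by unfold Spec_process_with_nge_key_py; infer_instance

-- ===== CLAIM (what is proved, stated in full; the proofs are below) =====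
def Claim_equal_process_with_nge_key_py : Prop := ∀ (data : String), Dom_process_with_nge_key_py data → Spec_process_with_nge_key_py data (process_with_nge_key_py data)

-- ===== LEMMAS AND PROOFS =====

-- `l[k % len(l):] + l[:k % len(l)]` is a left rotation by k
lemma rotStep (l : List Char) (k : Int) (kn : Nat) (hk : k = (kn:Int)) (hl : l ≠ []) :
    (PySem.List.slice l (some (PySem.Int.mod k (l.length:Int))) none ++
     PySem.List.slice l none (some (PySem.Int.mod k (l.length:Int)))) = l.rotate kn := by
  subst hk
  rw [PySem.Int.mod_natCast, PySem.List.slice_from_natCast, PySem.List.slice_to_natCast,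
    ← List.rotate_eq_drop_append_take (Nat.le_of_lt (Nat.mod_lt kn (List.length_pos_iff.mpr hl))),
    List.rotate_mod]

lemma stepA_zero (l : List Char) : stepA l '0' = l := by
  simp [stepA]

lemma stepA_nil (ch : Char) : stepA [] ch = [] := by
  simp [stepA]

lemma stepA_pos (l : List Char) (ch : Char) (kn : Nat) (hk : 0 < kn)
    (hch : (ch.toNat : Int) - ('0'.toNat : Int) = (kn:Int)) (hl : l ≠ []) :
    stepA l ch = l.rotate kn := by
  simp only [stepA, hch]
  rw [if_pos ⟨List.length_pos_iff.mpr hl, by exact_mod_cast hk⟩]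
  exact rotStep l _ kn rfl hl

-- ===== VERDICT (by name: the statement is the Claim_ definition above) =====
theorem process_with_nge_key_py_spec : Claim_equal_process_with_nge_key_py := by
  intro data _
  unfold Spec_process_with_nge_key_py process_with_nge_key_py process_with_nge_key_py_alt
  by_cases hl : data.toList = []
  · simp [hl, stepA_nil]
  · have hr : ∀ n, data.toList.rotate n ≠ [] := fun n h => hl (by simpa using List.rotate_eq_nil_iff.mp h)
    simp only [show "01234".toList = ['0','1','2','3','4'] from rfl, List.foldl]
    rw [stepA_zero, stepA_pos _ '1' 1 (by norm_num) (by decide) hl,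
      stepA_pos _ '2' 2 (by norm_num) (by decide) (hr 1), List.rotate_rotate,
      stepA_pos _ '3' 3 (by norm_num) (by decide) (hr 3), List.rotate_rotate,
      stepA_pos _ '4' 4 (by norm_num) (by decide) (hr 6), List.rotate_rotate]
    rw [if_pos (List.length_pos_iff.mpr hl), rotStep data.toList 10 10 (by norm_num) hl]
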